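-- pv_equiv track=rewrite | github.com/WhiteBearI/read_for_you | root@8.130.122.185/read_for_you/Services/PDFService.py | _pages_to_range_string
-- ===== SOURCE A (Python) =====
-- def _pages_to_range_string(pages):
-- 	"""
-- 	将页码列表转换为范围字符串
--
-- 	参数:
-- 		pages: 排序后的页码列表，如 [1, 2, 3, 5, 7, 8, 9]
--
-- 	返回:
-- 		str: 范围字符串，如 "1-3,5,7-9"
-- 	"""
-- 	if not pages:
-- 		return ""
--
-- 	ranges = []
-- 	start = pages[0]
-- 	end = pages[0]
--
-- 	for i in range(1, len(pages)):
-- 		if pages[i] == end + 1: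
-- 			# 连续页码，扩展范围
-- 			end = pages[i]
-- 		else:
-- 			# 不连续，保存当前范围并开始新范围
-- 			if start == end:
-- 				ranges.append(str(start))
-- 			else:
-- 				ranges.append(f"{start}-{end}")
-- 			start = pages[i]
-- 			end = pages[i]
--
-- 	# 添加最后一个范围
-- 	if start == end:
-- 		ranges.append(str(start))
-- 	else:
-- 		ranges.append(f"{start}-{end}")
--
-- 	return ','.join(ranges)
-- ===== SOURCE B (Python) =====
-- def _pages_to_range_string(pages):
-- 	breaks = [q != p + 1 for p, q in zip(pages, pages[1:])]
-- 	firsts = [p for p, new in zip(pages, [True] + breaks) if new]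
-- 	lasts = [p for p, end in zip(pages, breaks + [True]) if end]
-- 	return ",".join(str(a) if a == b else f"{a}-{b}" for a, b in zip(firsts, lasts))
-- ===== Notes on version B (the rewrite author's own statement) =====
-- stated objective: alternative
-- what changed: Replaces A's stateful single-pass run compressor (carried start/end variables plus a post-loop flush) by staged list passes in the groupby style: a list of boolean break flags between non-consecutive neighbours, then the run starts and run ends selected by zipping pages against the flag list shifted each way, finally zipped pairwise into pieces.
import Mathlib
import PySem

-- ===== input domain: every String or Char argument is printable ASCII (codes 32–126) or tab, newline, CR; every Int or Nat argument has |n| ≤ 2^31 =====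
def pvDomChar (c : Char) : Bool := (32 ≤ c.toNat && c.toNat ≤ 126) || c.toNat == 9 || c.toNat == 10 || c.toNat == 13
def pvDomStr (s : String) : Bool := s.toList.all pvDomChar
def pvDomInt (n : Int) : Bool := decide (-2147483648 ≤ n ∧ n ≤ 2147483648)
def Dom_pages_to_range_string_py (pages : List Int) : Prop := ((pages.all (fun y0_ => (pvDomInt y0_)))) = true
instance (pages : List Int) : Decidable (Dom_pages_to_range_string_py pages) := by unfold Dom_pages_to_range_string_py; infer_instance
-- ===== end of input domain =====

-- B replaces A's stateful run-compression loop by staged passes: boolean break flags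
-- between non-consecutive neighbours, run starts/ends selected by shifted flag lists,
-- zipped into pieces (objective: alternative, same O(n) cost).

-- ===== PORT A =====
-- "start-end" piece string: the shape of A's two identical if/else append sites
def pvPiece (a b : Int) : String :=
  if a = b then PySem.Int.toStr a else PySem.Int.toStr a ++ "-" ++ PySem.Int.toStr b

-- A's loop body on state (ranges, start, end) and the fetched page value pages[i]
def pvStep (st : List String × Int × Int) (p : Int) : List String × Int × Int :=
  if p = st.2.2 + 1 then (st.1, st.2.1, p)
  else (st.1 ++ [pvPiece st.2.1 st.2.2], p, p)

def pages_to_range_string_py (pages : List Int) : String :=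
  if pages = [] then ""
  else
    let p0 := PySem.List.pyGetD pages 0 0
    let st := (PySem.List.pyRange 1 (PySem.List.len pages) 1).foldl
      (fun st i => pvStep st (PySem.List.pyGetD pages i 0)) ([], p0, p0)
    PySem.Str.join "," (st.1 ++ [pvPiece st.2.1 st.2.2])

-- ===== PORT B =====
def pages_to_range_string_py_alt (pages : List Int) : String :=
  -- breaks = [q != p + 1 for p, q in zip(pages, pages[1:])]
  let breaks := (pages.zip (PySem.List.slice pages (some 1) none)).map
    (fun pq => decide (pq.2 ≠ pq.1 + 1))
  -- firsts = [p for p, new in zip(pages, [True] + breaks) if new]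
  let firsts := ((pages.zip (true :: breaks)).filter (fun pb => pb.2)).map (fun pb => pb.1)
  -- lasts = [p for p, end in zip(pages, breaks + [True]) if end]
  let lasts := ((pages.zip (breaks ++ [true])).filter (fun pb => pb.2)).map (fun pb => pb.1)
  PySem.Str.join "," ((firsts.zip lasts).map (fun ab => if ab.1 = ab.2 then PySem.Int.toStr ab.1 else PySem.Int.toStr ab.1 ++ "-" ++ PySem.Int.toStr ab.2))

-- ===== PRECONDITION & SPEC =====
def Spec_pages_to_range_string_py (pages : List Int) (out : String) : Prop := out = pages_to_range_string_py_alt pages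
instance (pages : List Int) (out : String) : Decidable (Spec_pages_to_range_string_py pages out) := by unfold Spec_pages_to_range_string_py; infer_instance

-- ===== CLAIM (what is proved, stated in full; the proofs are below) =====
def Claim_equal_pages_to_range_string_py : Prop := ∀ (pages : List Int), Dom_pages_to_range_string_py pages → Spec_pages_to_range_string_py pages (pages_to_range_string_py pages)

-- ===== LEMMAS AND PROOFS =====
-- maximal stretch continuing prev by +1 steps, and the remainder (proof-side run analysis)
def pvTakeRun (prev : Int) : List Int → List Int × List Int
  | [] => ([], [])
  | q :: rest =>
    if q = prev + 1 then
      let pr := pvTakeRun q rest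
      (q :: pr.1, pr.2)
    else ([], q :: rest)

theorem pvTakeRun_len (prev : Int) (l : List Int) : (pvTakeRun prev l).2.length ≤ l.length := by
  induction l generalizing prev with
  | nil => simp [pvTakeRun]
  | cons q rest ih =>
    simp only [pvTakeRun]
    split
    · exact Nat.le_succ_of_le (ih q)
    · simp

def pvRuns : List Int → List (List Int)
  | [] => []
  | p :: rest => (p :: (pvTakeRun p rest).1) :: pvRuns (pvTakeRun p rest).2
  termination_by l => l.length
  decreasing_by exact Nat.lt_succ_of_le (pvTakeRun_len p rest)

def pvPieceOf : List Int → String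
  | [] => ""
  | q :: qs => pvPiece q (qs.getLastD q)

theorem pvRuns_nil : pvRuns [] = [] := by rw [pvRuns]

theorem pvRuns_cons (p : Int) (rest : List Int) :
    pvRuns (p :: rest) = (p :: (pvTakeRun p rest).1) :: pvRuns (pvTakeRun p rest).2 := by
  rw [pvRuns]

theorem pvLastD_cons (l : List Int) (a d : Int) :
    ((a :: l).getLast?.getD d) = l.getLast?.getD a := by
  cases l with
  | nil => rfl
  | cons b t => simp [List.getLast?_cons]

-- ===== A-side: the fold equals the pieces of the maximal runs =====
theorem pvLoop (rest : List Int) : ∀ (ranges : List String) (s e : Int),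
    (rest.foldl pvStep (ranges, s, e)).1 ++ [pvPiece (rest.foldl pvStep (ranges, s, e)).2.1 (rest.foldl pvStep (ranges, s, e)).2.2]
    = ranges ++ pvPiece s ((pvTakeRun e rest).1.getLastD e) :: ((pvRuns (pvTakeRun e rest).2).map pvPieceOf) := by
  induction rest with
  | nil => intro ranges s e; simp [pvTakeRun, pvRuns_nil]
  | cons p rest ih =>
    intro ranges s e
    by_cases hp : p = e + 1
    · simp only [List.foldl_cons, pvStep, hp, pvTakeRun, ih]
      simp [pvLastD_cons]
    · simp only [List.foldl_cons, pvStep, if_neg hp, pvTakeRun, ih, pvRuns_cons]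
      simp [pvPieceOf]

theorem pvA_eq_runs (pages : List Int) :
    pages_to_range_string_py pages = PySem.Str.join "," ((pvRuns pages).map pvPieceOf) := by
  cases pages with
  | nil => simp [pages_to_range_string_py, pvRuns_nil, PySem.Str.join]
  | cons p rest =>
    unfold pages_to_range_string_py
    rw [if_neg (by simp)]
    show PySem.Str.join ","
        ((List.foldl (fun st i => pvStep st (PySem.List.pyGetD (p :: rest) i 0)) ([], PySem.List.pyGetD (p :: rest) 0 0, PySem.List.pyGetD (p :: rest) 0 0)
            (PySem.List.pyRange 1 (PySem.List.len (p :: rest)) 1)).1 ++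
         [pvPiece
            (List.foldl (fun st i => pvStep st (PySem.List.pyGetD (p :: rest) i 0)) ([], PySem.List.pyGetD (p :: rest) 0 0, PySem.List.pyGetD (p :: rest) 0 0)
              (PySem.List.pyRange 1 (PySem.List.len (p :: rest)) 1)).2.1
            (List.foldl (fun st i => pvStep st (PySem.List.pyGetD (p :: rest) i 0)) ([], PySem.List.pyGetD (p :: rest) 0 0, PySem.List.pyGetD (p :: rest) 0 0)
              (PySem.List.pyRange 1 (PySem.List.len (p :: rest)) 1)).2.2])
      = PySem.Str.join "," (List.map pvPieceOf (pvRuns (p :: rest)))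
    rw [PySem.List.foldl_pyRange_pyGetD (p :: rest) 0 pvStep (([], PySem.List.pyGetD (p :: rest) 0 0, PySem.List.pyGetD (p :: rest) 0 0) : List String × Int × Int) (by norm_num : (0:Int) ≤ 1)]
    simp only [Int.toNat_one, List.drop_succ_cons, List.drop_zero]
    rw [pvLoop rest []]
    simp [pvRuns_cons, pvPieceOf, PySem.List.pyGetD_zero_cons]

-- ===== B-side: flag selection equals the pieces of the maximal runs =====
def pvBreaks (l : List Int) : List Bool :=
  (l.zip l.tail).map (fun pq => decide (pq.2 ≠ pq.1 + 1))

def pvSel (l : List Int) (bs : List Bool) : List Int :=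
  ((l.zip bs).filter (fun pb => pb.2)).map (fun pb => pb.1)

def pvTailFlags : List Int → List Bool
  | [] => []
  | r :: t => true :: pvBreaks (r :: t)

theorem pvBreaks_cons₂ (x y : Int) (t : List Int) :
    pvBreaks (x :: y :: t) = decide (y ≠ x + 1) :: pvBreaks (y :: t) := rfl

theorem pvTakeRun_append (prev : Int) (l : List Int) :
    (pvTakeRun prev l).1 ++ (pvTakeRun prev l).2 = l := by
  induction l generalizing prev with
  | nil => simp [pvTakeRun]
  | cons q rest ih =>
    simp only [pvTakeRun]
    split
    · simpa using ih q
    · simp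

theorem pvBreaks_run (l : List Int) : ∀ prev : Int,
    pvBreaks (prev :: l) = List.replicate (pvTakeRun prev l).1.length false ++ pvTailFlags (pvTakeRun prev l).2 := by
  induction l with
  | nil => intro prev; simp [pvBreaks, pvTakeRun, pvTailFlags]
  | cons q t ih =>
    intro prev
    by_cases h : q = prev + 1
    · simp only [pvTakeRun, if_pos h]
      rw [pvBreaks_cons₂, ih q]
      simp [h, List.replicate_succ]
    · simp only [pvTakeRun, if_neg h]
      rw [pvBreaks_cons₂]
      simp [pvTailFlags, h]

theorem pvSel_nil (bs : List Bool) : pvSel [] bs = [] := by simp [pvSel]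

theorem pvSel_cons_true (x : Int) (l : List Int) (bs : List Bool) :
    pvSel (x :: l) (true :: bs) = x :: pvSel l bs := by simp [pvSel]

theorem pvSel_cons_false (x : Int) (l : List Int) (bs : List Bool) :
    pvSel (x :: l) (false :: bs) = pvSel l bs := by simp [pvSel]

theorem pvSel_skip (a : List Int) (c : List Int) (bs : List Bool) :
    pvSel (a ++ c) (List.replicate a.length false ++ bs) = pvSel c bs := by
  induction a with
  | nil => simp
  | cons y a' ih => simpa [List.replicate_succ, pvSel_cons_false] using ih

theorem pvSel_last (a : List Int) : ∀ (x : Int) (c : List Int) (bs : List Bool),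
    pvSel (x :: (a ++ c)) (List.replicate a.length false ++ (true :: bs)) = a.getLastD x :: pvSel c bs := by
  induction a with
  | nil => intro x c bs; simp [pvSel_cons_true]
  | cons y a' ih =>
    intro x c bs
    simp only [List.length_cons, List.replicate_succ, List.cons_append]
    rw [pvSel_cons_false, ih y]
    simp [pvLastD_cons]

theorem pvMain (n : Nat) : ∀ (l : List Int), l.length ≤ n → ∀ prev : Int,
    ((pvSel (prev :: l) (true :: pvBreaks (prev :: l))).zip
      (pvSel (prev :: l) (pvBreaks (prev :: l) ++ [true]))).map (fun ab => if ab.1 = ab.2 then PySem.Int.toStr ab.1 else PySem.Int.toStr ab.1 ++ "-" ++ PySem.Int.toStr ab.2)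
    = (pvRuns (prev :: l)).map pvPieceOf := by
  induction n with
  | zero =>
    intro l hl prev
    cases l with
    | cons a b => simp at hl
    | nil =>
      simp [pvBreaks, pvSel, pvRuns_cons, pvTakeRun, pvRuns_nil, pvPieceOf, pvPiece]
  | succ n ih =>
    intro l hl prev
    rcases h : pvTakeRun prev l with ⟨run, rem⟩
    have hsplit := pvTakeRun_append prev l
    rw [h] at hsplit
    subst hsplit
    rw [pvBreaks_run, pvRuns_cons, h]
    cases rem with
    | nil =>
      simp only [pvTailFlags]
      rw [pvSel_cons_true, pvSel_skip,
          show (List.replicate run.length false ++ ([] : List Bool)) ++ [true]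
            = List.replicate run.length false ++ (true :: []) by simp,
          pvSel_last]
      simp [pvSel_nil, pvRuns_nil, pvPieceOf, pvPiece]
    | cons r t =>
      have hlen : t.length ≤ n := by simp at hl; omega
      simp only [pvTailFlags]
      rw [pvSel_cons_true, pvSel_skip,
          show (List.replicate run.length false ++ (true :: pvBreaks (r :: t))) ++ [true]
            = List.replicate run.length false ++ (true :: (pvBreaks (r :: t) ++ [true])) by simp,
          pvSel_last]
      rw [List.zip_cons_cons, List.map_cons, ih t hlen r, pvRuns_cons]
      simp [pvPieceOf, pvPiece]

theorem pvB_eq_runs (pages : List Int) :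
    pages_to_range_string_py_alt pages = PySem.Str.join "," ((pvRuns pages).map pvPieceOf) := by
  cases pages with
  | nil => simp [pages_to_range_string_py_alt, pvRuns_nil, PySem.List.slice]
  | cons p rest =>
    unfold pages_to_range_string_py_alt
    rw [PySem.List.slice_from_one]
    show PySem.Str.join ","
        (((pvSel (p :: rest) (true :: pvBreaks (p :: rest))).zip
          (pvSel (p :: rest) (pvBreaks (p :: rest) ++ [true]))).map (fun ab => if ab.1 = ab.2 then PySem.Int.toStr ab.1 else PySem.Int.toStr ab.1 ++ "-" ++ PySem.Int.toStr ab.2))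
      = PySem.Str.join "," ((pvRuns (p :: rest)).map pvPieceOf)
    rw [pvMain rest.length rest (le_refl _) p]

-- ===== VERDICT (by name: the statement is the Claim_ definition above) =====
theorem pages_to_range_string_py_spec : Claim_equal_pages_to_range_string_py := by
  intro pages _
  unfold Spec_pages_to_range_string_py
  rw [pvA_eq_runs, pvB_eq_runs]
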